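-- pv_equiv track=rewrite | github.com/misterrager8/notable | notable/models.py | check_duplicate
-- ===== SOURCE A (Python) =====
-- def check_duplicate(name: str, list_of_names: list) -> str:
--     """Check if a filename is found. If true, return filename with an int appended to the end. Return original name if false."""
--     name = name.strip()
--     if name in list_of_names:
--         if (name[-1]).isdigit():
--             num = int(name[-1])
--             return check_duplicate(name[:-1] + f"{str(num + 1)}", list_of_names)
--         else:
--             return check_duplicate(f"{name} 2", list_of_names)
--     else:
--         return name
-- ===== SOURCE B (Python) =====
-- def _collide(name):
--     """One collision transformation: bump a trailing digit or append ' 2'."""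
--     last = name[-1]
--     if last.isdigit():
--         return name[:-1] + str(int(last) + 1)
--     return name + " 2"
--
--
-- def check_duplicate(name: str, list_of_names: list) -> str:
--     """Check if a filename is found. If true, return filename with an int appended to the end. Return original name if false."""
--     existing = set(list_of_names)
--     name = name.strip()
--     while name in existing:
--         name = _collide(name)
--     return name
-- ===== Notes on version B (the rewrite author's own statement) =====
-- stated objective: idiomatic
-- what changed: Tail recursion with a per-call re-strip over the raw list is replaced by a single up-front strip, a set built once for membership tests, and an explicit while loop applying the collision transformation (the re-strip is dropped because the transformation provably preserves strippedness).
import Mathlib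
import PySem

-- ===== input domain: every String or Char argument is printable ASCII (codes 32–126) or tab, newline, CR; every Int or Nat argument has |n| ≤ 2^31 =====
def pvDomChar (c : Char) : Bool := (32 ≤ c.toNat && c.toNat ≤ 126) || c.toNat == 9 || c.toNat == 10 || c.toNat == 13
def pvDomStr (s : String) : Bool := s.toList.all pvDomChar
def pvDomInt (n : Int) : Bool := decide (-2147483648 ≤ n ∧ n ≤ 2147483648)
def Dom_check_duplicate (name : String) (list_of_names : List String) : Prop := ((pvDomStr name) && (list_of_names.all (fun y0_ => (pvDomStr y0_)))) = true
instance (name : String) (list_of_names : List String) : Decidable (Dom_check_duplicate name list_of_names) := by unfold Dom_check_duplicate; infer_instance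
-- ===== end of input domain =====

-- B replaces A's tail recursion (which re-strips and scans the raw list on every call) by one
-- up-front strip, a set built once, and a while loop applying the same collision transformation.

-- ===== PORT A =====
-- A's tail recursion, made total with a fuel guard (depth ≤ collisions + 1 ≤ length + 1).
def check_duplicate_go (fuel : Nat) (name : String) (list_of_names : List String) : String :=
  let name := PySem.Str.strip name
  match fuel with
  | 0 => name  -- fuel guard only; enough fuel is supplied below
  | fuel + 1 =>
    if name ∈ list_of_names then
      match PySem.Str.pyGet? name (-1) with
      | none => name  -- Python raises IndexError here (empty stripped name); excluded by Pre_
      | some c =>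
        if PySem.Chars.isdigit c then
          -- int(name[-1]) : exact for a single ASCII digit (guarded by isdigit)
          let num : Int := (c.toNat : Int) - 48
          check_duplicate_go fuel
            (PySem.Str.slice name none (some (-1)) ++ PySem.Int.toStr (num + 1)) list_of_names
        else
          check_duplicate_go fuel (name ++ " 2") list_of_names
    else name

def check_duplicate (name : String) (list_of_names : List String) : String :=
  check_duplicate_go (list_of_names.length + 1) name list_of_names

-- ===== PORT B =====
-- one collision transformation: bump a trailing digit or append " 2"
def pvCollide (name : String) : String :=
  match PySem.Str.pyGet? name (-1) with
  | none => name  -- Python raises IndexError here; excluded by Pre_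
  | some last =>
    if PySem.Chars.isdigit last then
      PySem.Str.slice name none (some (-1)) ++ PySem.Int.toStr (((last.toNat : Int) - 48) + 1)
    else
      name ++ " 2"

-- the while loop, made total with the same fuel guard
def pvLoop (fuel : Nat) (name : String) (existing : PySem.Set String) : String :=
  match fuel with
  | 0 => name
  | fuel + 1 =>
    if PySem.Set.contains existing name then
      pvLoop fuel (pvCollide name) existing
    else name

def check_duplicate_alt (name : String) (list_of_names : List String) : String :=
  pvLoop (list_of_names.length + 1) (PySem.Str.strip name) (PySem.Set.ofList list_of_names)

-- ===== PRECONDITION & SPEC =====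
-- Pre_ excludes exactly the inputs on which Python A raises IndexError (name strips to "" and
-- "" is in the list); Python B raises there too.
def Pre_check_duplicate (name : String) (list_of_names : List String) : Prop :=
  ¬ (PySem.Str.strip name = "" ∧ "" ∈ list_of_names)
instance (name : String) (list_of_names : List String) : Decidable (Pre_check_duplicate name list_of_names) := by unfold Pre_check_duplicate; infer_instance

def pvWitness_check_duplicate : String × List String := ("doc", ["doc", "doc 2"])

def Spec_check_duplicate (name : String) (list_of_names : List String) (out : String) : Prop := out = check_duplicate_alt name list_of_names
instance (name : String) (list_of_names : List String) (out : String) : Decidable (Spec_check_duplicate name list_of_names out) := by unfold Spec_check_duplicate; infer_instance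

-- ===== CLAIM (what is proved, stated in full; the proofs are below) =====
def Claim_equal_check_duplicate : Prop := ∀ (name : String) (list_of_names : List String), Dom_check_duplicate name list_of_names → Pre_check_duplicate name list_of_names → Spec_check_duplicate name list_of_names (check_duplicate name list_of_names)

-- ===== LEMMAS AND PROOFS =====

-- head of a dropWhile does not satisfy the predicate
theorem pv_headDrop (p : Char → Bool) : ∀ (l : List Char) (c : Char) (t : List Char),
    l.dropWhile p = c :: t → p c = false := by
  intro l
  induction l with
  | nil => intro c t h; simp [List.dropWhile] at h
  | cons a l ih =>
    intro c t h
    by_cases hp : p a = true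
    · rw [List.dropWhile_cons_of_pos hp] at h; exact ih c t h
    · rw [List.dropWhile_cons_of_neg hp] at h
      cases h; simpa using hp

theorem pv_rstrip_prefix (l : List Char) : PySem.Chars.rstrip l <+: l := by
  have h : (PySem.Chars.rstrip l).reverse <:+ l.reverse := by
    simp only [PySem.Chars.rstrip, List.reverse_reverse]
    exact List.dropWhile_suffix _
  have := List.reverse_suffix.mp h
  simpa using this

-- the head of a stripped string is not whitespace
theorem pv_strip_head (l : List Char) (c : Char) (t : List Char)
    (h : PySem.Chars.strip l = c :: t) : PySem.Chars.isspace c = false := by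
  have hpre : PySem.Chars.strip l <+: PySem.Chars.lstrip l := pv_rstrip_prefix _
  rw [h] at hpre
  obtain ⟨t', ht'⟩ := hpre
  have : (PySem.Chars.lstrip l) = c :: (t ++ t') := by rw [← ht']; simp
  exact pv_headDrop _ l c (t ++ t') this

-- the last character of a stripped string is not whitespace
theorem pv_strip_last (l : List Char) (c : Char)
    (h : (PySem.Chars.strip l).getLast? = some c) : PySem.Chars.isspace c = false := by
  simp only [PySem.Chars.strip, PySem.Chars.rstrip] at h
  rw [List.getLast?_reverse] at h
  rw [List.head?_eq_some_iff] at h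
  obtain ⟨t, ht⟩ := h
  exact pv_headDrop _ _ c t ht

-- a string whose first and last characters are not whitespace is fixed by strip
theorem pv_strip_fix (l : List Char)
    (h1 : ∀ c t, l = c :: t → PySem.Chars.isspace c = false)
    (h2 : ∀ c, l.getLast? = some c → PySem.Chars.isspace c = false) :
    PySem.Chars.strip l = l := by
  cases l with
  | nil => simp [PySem.Chars.strip, PySem.Chars.lstrip, PySem.Chars.rstrip]
  | cons a t =>
    have ha : PySem.Chars.isspace a = false := h1 a t rfl
    have hl : PySem.Chars.lstrip (a :: t) = a :: t := by
      simp only [PySem.Chars.lstrip]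
      rw [List.dropWhile_cons_of_neg (by simp [ha])]
    rw [PySem.Chars.strip, hl]
    -- rstrip
    have hne : (a :: t) ≠ ([] : List Char) := by simp
    have hc : (a :: t).getLast? = some ((a :: t).getLast hne) :=
      List.getLast?_eq_getLast_of_ne_nil hne
    set c := (a :: t).getLast hne with hcdef
    have hcsp : PySem.Chars.isspace c = false := h2 c hc
    have hrev : (a :: t).reverse.head? = some c := by rw [List.head?_reverse]; exact hc
    rw [List.head?_eq_some_iff] at hrev
    obtain ⟨t', ht'⟩ := hrev
    simp only [PySem.Chars.rstrip, ht']
    rw [List.dropWhile_cons_of_neg (by simp [hcsp])]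
    rw [← ht']
    simp

-- the decimal representation of k ∈ [1,10] is nonempty with non-space first and last characters
theorem pv_toStr_digit (k : Int) (h1 : 1 ≤ k) (h2 : k ≤ 10) :
    (PySem.Int.toStr k).toList ≠ [] ∧
    ((PySem.Int.toStr k).toList.head?.all fun c => !PySem.Chars.isspace c) = true ∧
    ((PySem.Int.toStr k).toList.getLast?.all fun c => !PySem.Chars.isspace c) = true := by
  interval_cases k <;> exact ⟨by decide, by decide, by decide⟩

theorem pv_head_all {l : List Char} (h : (l.head?.all fun c => !PySem.Chars.isspace c) = true) :
    ∀ c t, l = c :: t → PySem.Chars.isspace c = false := by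
  intro c t he; subst he; simpa using h

theorem pv_last_all {l : List Char} (h : (l.getLast?.all fun c => !PySem.Chars.isspace c) = true) :
    ∀ c, l.getLast? = some c → PySem.Chars.isspace c = false := by
  intro c he; rw [he] at h; simpa using h

-- digit bounds from isdigit
theorem pv_digit_bounds (c : Char) (h : PySem.Chars.isdigit c = true) :
    48 ≤ c.toNat ∧ c.toNat ≤ 57 := by
  simp only [PySem.Chars.isdigit, Bool.and_eq_true, decide_eq_true_eq] at h
  obtain ⟨h1, h2⟩ := h
  constructor
  · exact h1
  · exact h2

-- the collision transformation preserves strippedness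
theorem pv_collide_fix (n : String) (hfix : PySem.Str.strip n = n) (c : Char)
    (hc : PySem.Str.pyGet? n (-1) = some c) :
    PySem.Str.strip (pvCollide n) = pvCollide n := by
  have hl : PySem.Chars.strip n.toList = n.toList := by
    have := congrArg String.toList hfix
    simpa [PySem.Str.strip] using this
  have hne : n.toList ≠ [] := by
    intro h
    rw [PySem.Str.pyGet?] at hc
    simp [h, PySem.Chars.pyGet?, PySem.List.pyGet?, PySem.List.pyIdx?] at hc
  -- head and last of n.toList are not whitespace
  have hhead : ∀ c' t, n.toList = c' :: t → PySem.Chars.isspace c' = false := by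
    intro c' t h; exact pv_strip_head n.toList c' t (hl.trans h)
  have hlast : ∀ c', n.toList.getLast? = some c' → PySem.Chars.isspace c' = false := by
    intro c' h; rw [← hl] at h; exact pv_strip_last n.toList c' h
  simp only [pvCollide, hc]
  by_cases hd : PySem.Chars.isdigit c = true
  · rw [if_pos hd]
    -- result = n[:-1] ++ toStr (d+1)
    obtain ⟨hb1, hb2⟩ := pv_digit_bounds c hd
    have hk1 : (1 : Int) ≤ (c.toNat : Int) - 48 + 1 := by omega
    have hk2 : (c.toNat : Int) - 48 + 1 ≤ 10 := by omega
    obtain ⟨hts_ne, hts_head', hts_last'⟩ := pv_toStr_digit _ hk1 hk2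
    have hts_head := pv_head_all hts_head'
    have hts_last := pv_last_all hts_last'
    have hres : (PySem.Str.slice n none (some (-1)) ++
        PySem.Int.toStr ((c.toNat : Int) - 48 + 1)).toList =
        n.toList.dropLast ++ (PySem.Int.toStr ((c.toNat : Int) - 48 + 1)).toList := by
      rw [String.toList_append, PySem.Str.slice_to_neg_one]
    have : PySem.Chars.strip ((PySem.Str.slice n none (some (-1)) ++
        PySem.Int.toStr ((c.toNat : Int) - 48 + 1)).toList) =
        (PySem.Str.slice n none (some (-1)) ++
        PySem.Int.toStr ((c.toNat : Int) - 48 + 1)).toList := by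
      rw [hres]
      apply pv_strip_fix
      · intro c' t h
        cases hdl : n.toList.dropLast with
        | nil =>
          rw [hdl, List.nil_append] at h
          exact hts_head c' t h
        | cons a r =>
          rw [hdl, List.cons_append] at h
          injection h with h1 h2
          rw [← h1]
          -- a is the head of n.toList
          have : n.toList = a :: (r ++ [n.toList.getLast hne]) := by
            conv_lhs => rw [← List.dropLast_append_getLast hne, hdl]
            simp
          exact hhead a _ this
      · intro c' h
        have hds := List.getLast?_eq_getLast_of_ne_nil hts_ne
        rw [List.getLast?_append, hds] at h
        rw [Option.some_or] at h
        exact hts_last c' (by rw [hds]; exact h)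
    simpa [PySem.Str.strip] using String.ext (by simpa using this)
  · rw [if_neg hd]
    have hres : (n ++ " 2").toList = n.toList ++ [' ', '2'] := by
      rw [String.toList_append]; rfl
    have : PySem.Chars.strip ((n ++ " 2").toList) = (n ++ " 2").toList := by
      rw [hres]
      apply pv_strip_fix
      · intro c' t h
        cases hnl : n.toList with
        | nil => exact absurd hnl hne
        | cons a r =>
          rw [hnl, List.cons_append] at h
          injection h with h1 h2
          rw [← h1]
          exact hhead a _ hnl
      · intro c' h
        rw [List.getLast?_append] at h
        simp only [List.getLast?_cons] at h
        rw [← Option.some_inj.mp h]; decide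
    simpa [PySem.Str.strip] using String.ext (by simpa using this)

-- strip is idempotent
theorem pv_strip_idem (s : String) : PySem.Str.strip (PySem.Str.strip s) = PySem.Str.strip s := by
  have h := pv_strip_fix (PySem.Chars.strip s.toList)
    (fun c t hh => pv_strip_head s.toList c t hh)
    (fun c hh => pv_strip_last s.toList c hh)
  simp only [PySem.Str.strip, String.toList_ofList, h]

-- membership bridge for the set built in B
theorem pv_contains_ofList (xs : List String) (x : String) :
    PySem.Set.contains (PySem.Set.ofList xs) x = decide (x ∈ xs) := by
  have hrfl : PySem.Set.contains (PySem.Set.ofList xs) x =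
      (PySem.Set.ofList xs).contains x := rfl
  rw [hrfl]
  by_cases h : x ∈ xs
  · simp [(PySem.Set.mem_ofList _ _).mpr h, h]
  · have h2 : x ∉ PySem.Set.ofList xs := fun hm => h ((PySem.Set.mem_ofList _ _).mp hm)
    simp [h, h2]

-- the central loop correspondence: A's recursion = B's loop on the stripped name
theorem pv_go_eq_loop (list_of_names : List String) :
    ∀ (fuel : Nat) (name : String),
    check_duplicate_go fuel name list_of_names =
      pvLoop fuel (PySem.Str.strip name) (PySem.Set.ofList list_of_names) := by
  intro fuel
  induction fuel with
  | zero => intro name; simp [check_duplicate_go, pvLoop]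
  | succ f ih =>
    intro name
    rw [check_duplicate_go, pvLoop]
    simp only [pv_contains_ofList]
    by_cases hm : PySem.Str.strip name ∈ list_of_names
    · rw [if_pos hm, if_pos (by simpa using hm)]
      cases hc : PySem.Str.pyGet? (PySem.Str.strip name) (-1) with
      | none =>
        -- Python raises here; both ports return the current name
        simp only [pvCollide, hc]
        clear ih
        induction f with
        | zero => rw [pvLoop]
        | succ g ihg =>
          rw [pvLoop]
          simp only [pv_contains_ofList]
          rw [if_pos (by simpa using hm)]; simp only [pvCollide, hc]
          exact ihg
      | some c =>
        have hfix : PySem.Str.strip (pvCollide (PySem.Str.strip name)) =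
            pvCollide (PySem.Str.strip name) :=
          pv_collide_fix _ (pv_strip_idem name) c hc
        by_cases hd : PySem.Chars.isdigit c = true
        · have hcoll : pvCollide (PySem.Str.strip name) =
              PySem.Str.slice (PySem.Str.strip name) none (some (-1)) ++
                PySem.Int.toStr (((c.toNat : Int) - 48) + 1) := by
            simp only [pvCollide, hc]; rw [if_pos hd]
          simp only [hd]
          rw [if_pos trivial, ← hcoll, ih, hfix]
        · have hd' : PySem.Chars.isdigit c = false := by simpa using hd
          have hcoll : pvCollide (PySem.Str.strip name) = PySem.Str.strip name ++ " 2" := by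
            simp only [pvCollide, hc]; rw [if_neg hd]
          simp only [hd']
          rw [if_neg (by simp), ← hcoll, ih, hfix]
    · rw [if_neg hm, if_neg (by simpa using hm)]

-- ===== VERDICT (by name: the statement is the Claim_ definition above) =====
theorem check_duplicate_spec : Claim_equal_check_duplicate := by
  intro name list_of_names _ _
  unfold Spec_check_duplicate check_duplicate check_duplicate_alt
  exact pv_go_eq_loop list_of_names (list_of_names.length + 1) name
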